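-- pv_equiv track=rewrite | github.com/wgr523/GHZDetectionPlot | getanglelist.py | getanglelistS7
-- ===== SOURCE A (Python) =====
-- def getanglelistS7(N):
--     for i0 in range(2,N):
--         for i1 in range(i0+1,N):
--             for i2 in range(i1+1,N):
--                 for i3 in range(i2+1,N):
--                     for i4 in range(i3+1,N):
--                         for i5 in range(i4+1,N):
--                             yield ([0,i0,i1,i2,i3,i4,i5])
--                             yield ([1,i0,i1,i2,i3,i4,i5])
--     for i0 in range(2,N):
--         for i1 in range(i0+1,N):
--             for i2 in range(i1+1,N):
--                 for i3 in range(i2+1,N):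
--                     for i4 in range(i3+1,N):
--                         yield ([0,1,i0,i1,i2,i3,i4])
-- ===== SOURCE B (Python) =====
-- def _combos(k, xs):
--     # all k-element increasing-index combinations of xs, in lexicographic order
--     if k == 0:
--         return [[]]
--     if not xs:
--         return []
--     return [[xs[0]] + c for c in _combos(k - 1, xs[1:])] + _combos(k, xs[1:])
--
-- def getanglelistS7(N):
--     idx = list(range(2, N))
--     for c in _combos(6, idx):
--         yield [0] + c
--         yield [1] + c
--     for c in _combos(5, idx):
--         yield [0, 1] + c
-- ===== Notes on version B (the rewrite author's own statement) =====
-- stated objective: idiomatic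
-- what changed: Replaces the six- and five-deep nested index loops with a single recursive k-combinations generator over range(2,N), prefixing [0]/[1]/[0,1] to each combination.
import Mathlib
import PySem

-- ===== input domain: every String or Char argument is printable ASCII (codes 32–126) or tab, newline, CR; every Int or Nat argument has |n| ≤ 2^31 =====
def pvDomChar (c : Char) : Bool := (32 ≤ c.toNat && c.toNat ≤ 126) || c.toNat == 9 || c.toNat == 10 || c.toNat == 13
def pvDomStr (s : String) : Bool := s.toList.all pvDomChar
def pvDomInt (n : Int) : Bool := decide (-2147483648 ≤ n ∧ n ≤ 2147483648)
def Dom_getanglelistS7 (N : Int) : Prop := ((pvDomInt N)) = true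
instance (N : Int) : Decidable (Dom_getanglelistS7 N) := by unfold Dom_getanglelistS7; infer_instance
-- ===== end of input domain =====

-- B replaces the nested index loops by one recursive k-combinations generator; idiomatic, same cost.

-- ===== PORT A =====
-- literal transliteration of A's two blocks of nested loops (generator consumed into a list)
def getanglelistS7 (N : Int) : List (List Int) :=
  ((PySem.List.pyRange 2 N 1).flatMap (fun i0 =>
    (PySem.List.pyRange (i0+1) N 1).flatMap (fun i1 =>
      (PySem.List.pyRange (i1+1) N 1).flatMap (fun i2 =>
        (PySem.List.pyRange (i2+1) N 1).flatMap (fun i3 =>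
          (PySem.List.pyRange (i3+1) N 1).flatMap (fun i4 =>
            (PySem.List.pyRange (i4+1) N 1).flatMap (fun i5 =>
              [[0,i0,i1,i2,i3,i4,i5], [1,i0,i1,i2,i3,i4,i5]])))))))
  ++
  ((PySem.List.pyRange 2 N 1).flatMap (fun i0 =>
    (PySem.List.pyRange (i0+1) N 1).flatMap (fun i1 =>
      (PySem.List.pyRange (i1+1) N 1).flatMap (fun i2 =>
        (PySem.List.pyRange (i2+1) N 1).flatMap (fun i3 =>
          (PySem.List.pyRange (i3+1) N 1).flatMap (fun i4 =>
            [[0,1,i0,i1,i2,i3,i4]]))))))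

-- ===== PORT B =====
-- _combos of Source B: all k-element combinations of xs in lexicographic order
def pvCombos : Nat → List Int → List (List Int)
  | 0, _ => [[]]
  | _+1, [] => []
  | k+1, x :: xs => (pvCombos k xs).map (fun c => x :: c) ++ pvCombos (k+1) xs

def getanglelistS7_alt (N : Int) : List (List Int) :=
  ((pvCombos 6 (PySem.List.pyRange 2 N 1)).flatMap (fun c => [0 :: c, 1 :: c]))
  ++
  ((pvCombos 5 (PySem.List.pyRange 2 N 1)).map (fun c => 0 :: 1 :: c))

-- ===== PRECONDITION & SPEC =====
def Spec_getanglelistS7 (N : Int) (out : List (List Int)) : Prop := out = getanglelistS7_alt N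
instance (N : Int) (out : List (List Int)) : Decidable (Spec_getanglelistS7 N out) := by unfold Spec_getanglelistS7; infer_instance

-- ===== CLAIM (what is proved, stated in full; the proofs are below) =====
def Claim_equal_getanglelistS7 : Prop := ∀ (N : Int), Dom_getanglelistS7 N → Spec_getanglelistS7 N (getanglelistS7 N)

-- ===== LEMMAS AND PROOFS =====

-- k nested loops "for i in range(a,N): … recurse at a = i+1 …", each combination tagged by its index list
def pvLoops (N : Int) : Nat → Int → List (List Int)
  | 0, _ => [[]]
  | k+1, a => (PySem.List.pyRange a N 1).flatMap (fun i => (pvLoops N k (i+1)).map (fun c => i :: c))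

-- nested loops with an arbitrary innermost body f applied to the index list
def pvNest (N : Int) : Nat → Int → (List Int → List (List Int)) → List (List Int)
  | 0, _, f => f []
  | k+1, a, f => (PySem.List.pyRange a N 1).flatMap (fun i => pvNest N k (i+1) (fun c => f (i :: c)))

theorem pvNest_eq (N : Int) : ∀ (k : Nat) (a : Int) (f : List Int → List (List Int)),
    pvNest N k a f = (pvLoops N k a).flatMap f := by
  intro k
  induction k with
  | zero => intro a f; simp [pvNest, pvLoops]
  | succ k ih =>
    intro a f
    simp only [pvNest, pvLoops, List.flatMap_assoc, List.map_eq_flatMap, ih]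
    simp

theorem pvCombos_eq_pvLoops (N : Int) : ∀ (m : Nat) (a : Int), (N - a).toNat ≤ m →
    ∀ (k : Nat), pvCombos k (PySem.List.pyRange a N 1) = pvLoops N k a := by
  intro m
  induction m with
  | zero =>
    intro a ha k
    have hNa : N ≤ a := by omega
    rw [PySem.List.pyRange_one_eq_nil hNa]
    cases k with
    | zero => simp [pvCombos, pvLoops]
    | succ k => simp [pvCombos, pvLoops, PySem.List.pyRange_one_eq_nil hNa]
  | succ m ih =>
    intro a ha k
    by_cases h : a < N
    · rw [PySem.List.pyRange_one_cons h]
      cases k with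
      | zero => simp [pvCombos, pvLoops]
      | succ k =>
        have ha' : (N - (a+1)).toNat ≤ m := by omega
        simp only [pvCombos, ih (a+1) ha' k, ih (a+1) ha' (k+1)]
        conv_rhs => rw [pvLoops, PySem.List.pyRange_one_cons h]
        simp [pvLoops]
    · have hNa : N ≤ a := by omega
      rw [PySem.List.pyRange_one_eq_nil hNa]
      cases k with
      | zero => simp [pvCombos, pvLoops]
      | succ k => simp [pvCombos, pvLoops, PySem.List.pyRange_one_eq_nil hNa]

-- ===== VERDICT (by name: the statement is the Claim_ definition above) =====
theorem getanglelistS7_spec : Claim_equal_getanglelistS7 := by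
  intro N _
  unfold Spec_getanglelistS7 getanglelistS7 getanglelistS7_alt
  rw [pvCombos_eq_pvLoops N (N - 2).toNat 2 (le_refl _) 6,
      pvCombos_eq_pvLoops N (N - 2).toNat 2 (le_refl _) 5]
  rw [List.map_eq_flatMap,
      ← pvNest_eq N 5 2 (fun c => [0 :: 1 :: c]),
      ← pvNest_eq N 6 2 (fun c => [0 :: c, 1 :: c])]
  rfl
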